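-- pv_equiv track=rewrite | github.com/chanw12/c-prac | 프로그래머스/PCCP 모의고사 1회/체육대회.py | solution
-- ===== SOURCE A (Python) =====
-- from itertools import permutations
--
-- def solution(ability):
--     answer = 0
--     st = [i for i in range(len(ability))]
--     stuNum = len(ability)
--     kkNum = len(ability[0])
--     ll = list(permutations(st,kkNum))
--     summ = []
--
--
--     for l in ll:
--         s = 0
--         for i in range(kkNum):
--             s += ability[l[i]][i]
--         summ.append(s)
--     summ = sorted(summ)
--     answer = summ[-1]
--     return answer
-- ===== SOURCE B (Python) =====
-- def solution(ability):
--     # Recursive max over event slots: pick a student for event i from the remaining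
--     # pool and recurse; no permutation list, no sum list, no sort.
--     k = len(ability[0])
--
--     def best(i, avail):
--         if i == k:
--             return 0
--         return max(ability[s][i] + best(i + 1, [t for t in avail if t != s]) for s in avail)
--
--     return best(0, list(range(len(ability))))
-- ===== Notes on version B (the rewrite author's own statement) =====
-- stated objective: alternative
-- what changed: B replaces A's pipeline (materialise all k-permutations of students, compute every sum, sort the sums, take the last) by a direct recursive maximisation over event slots with a shrinking pool of remaining students, with no permutation list, no sum list and no sort.
import Mathlib
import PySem

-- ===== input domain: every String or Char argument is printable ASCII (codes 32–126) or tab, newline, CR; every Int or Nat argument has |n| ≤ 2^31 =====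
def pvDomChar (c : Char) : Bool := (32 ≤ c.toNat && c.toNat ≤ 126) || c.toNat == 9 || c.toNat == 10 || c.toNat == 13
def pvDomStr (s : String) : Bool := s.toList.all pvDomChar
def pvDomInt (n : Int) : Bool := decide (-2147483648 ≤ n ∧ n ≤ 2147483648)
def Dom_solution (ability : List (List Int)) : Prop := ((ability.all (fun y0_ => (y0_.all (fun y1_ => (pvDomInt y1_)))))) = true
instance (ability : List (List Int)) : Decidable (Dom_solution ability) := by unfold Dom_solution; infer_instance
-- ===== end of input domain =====

-- B replaces A's enumerate-all-permutations / sum / sort pipeline by a recursive max over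
-- event slots with a shrinking pool of students (objective: alternative decomposition).

-- ===== PORT A =====
-- literal port of A: build all k-permutations of the student indices, sum each, sort, take last
def solution (ability : List (List Int)) : Int :=
  let st : List Int := (List.range ability.length).map (fun (i : Nat) => (i : Int))
  let kkNum : Nat := ((PySem.List.pyGet? ability 0).getD []).length
  let ll := PySem.List.permutations st kkNum
  let summ := ll.foldl (fun summ l =>
      summ ++ [(List.range kkNum).foldl (fun (s : Int) (i : Nat) =>
          s + (PySem.List.pyGet? ((PySem.List.pyGet? ability
                ((PySem.List.pyGet? l (i : Int)).getD 0)).getD []) (i : Int)).getD 0) 0]) []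
  (PySem.List.pyGet? (PySem.List.sorted summ (fun x => x) false) (-1)).getD 0
  -- the `.getD` defaults are never taken under Pre_solution (A raises exactly there)

-- ===== PORT B =====
-- port of Source B's `best(i, avail)`; the structural fuel `rem` is k - i (Python stops at i == k)
def pvBest (ability : List (List Int)) : Nat → Nat → List Int → Int
  | 0, _, _ => 0
  | rem + 1, i, avail =>
      (PySem.List.max? (avail.map (fun s =>
          (PySem.List.pyGet? ((PySem.List.pyGet? ability s).getD []) (i : Int)).getD 0
            + pvBest ability rem (i + 1) (avail.filter (fun t => t != s))))
        (fun x => x)).getD 0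

def solution_alt (ability : List (List Int)) : Int :=
  let k : Nat := ((PySem.List.pyGet? ability 0).getD []).length
  pvBest ability k 0 ((List.range ability.length).map (fun (i : Nat) => (i : Int)))

-- ===== PRECONDITION & SPEC =====
-- Pre_ excludes exactly the inputs where A raises (IndexError): empty ability, more events
-- than students, or some row shorter than the event count.
def Pre_solution (ability : List (List Int)) : Prop :=
  ability ≠ [] ∧ (ability.headD []).length ≤ ability.length ∧
    ∀ row ∈ ability, (ability.headD []).length ≤ row.length
instance (ability : List (List Int)) : Decidable (Pre_solution ability) := by
  unfold Pre_solution; infer_instance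

def pvWitness_solution : List (List Int) := [[1, 2], [3, 4]]

def Spec_solution (ability : List (List Int)) (out : Int) : Prop := out = solution_alt ability
instance (ability : List (List Int)) (out : Int) : Decidable (Spec_solution ability out) := by
  unfold Spec_solution; infer_instance

-- ===== CLAIM (what is proved, stated in full; the proofs are below) =====
def Claim_equal_solution : Prop := ∀ (ability : List (List Int)), Dom_solution ability →
  Pre_solution ability → Spec_solution ability (solution ability)

-- ===== LEMMAS AND PROOFS =====

-- ability[s][i] as both ports read it
def pvVal (ability : List (List Int)) (s : Int) (i : Nat) : Int :=
  (PySem.List.pyGet? ((PySem.List.pyGet? ability s).getD []) (i : Int)).getD 0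

-- the sum A computes for one permutation l, columns counted from i
def pvPSum (ability : List (List Int)) : List Int → Nat → Int
  | [], _ => 0
  | s :: t, i => pvVal ability s i + pvPSum ability t (i + 1)

theorem pv_perm_length : ∀ (r : Nat) (xs p : List Int),
    p ∈ PySem.List.permutations xs r → p.length = r := by
  intro r
  induction r with
  | zero => intro xs p h; rw [PySem.List.permutations] at h; simp at h; simp [h]
  | succ r ih =>
    intro xs p h
    rw [PySem.List.permutations] at h
    simp only [List.mem_flatMap, List.mem_range] at h
    obtain ⟨j, hj, hp⟩ := h
    cases hx : xs[j]? with
    | none => rw [hx] at hp; simp at hp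
    | some a =>
      rw [hx] at hp
      simp only [List.mem_map] at hp
      obtain ⟨q, hq, rfl⟩ := hp
      simp [ih _ _ hq]

-- B's recursion computes the max of A's per-permutation sums
theorem pvBest_max (ability : List (List Int)) : ∀ (rem : Nat) (avail : List Int) (i : Nat),
    avail.Nodup → rem ≤ avail.length →
    pvBest ability rem i avail ∈ (PySem.List.permutations avail rem).map (fun l => pvPSum ability l i)
    ∧ ∀ x ∈ (PySem.List.permutations avail rem).map (fun l => pvPSum ability l i),
        x ≤ pvBest ability rem i avail := by
  intro rem
  induction rem with
  | zero =>
    intro avail i _ _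
    constructor
    · rw [PySem.List.permutations]; simp [pvBest, pvPSum]
    · intro x hx; rw [PySem.List.permutations] at hx; simp [pvPSum] at hx; simp [hx, pvBest]
  | succ rem ih =>
    intro avail i hnd hlen
    -- the candidate list is nonempty, so max? returns its max m
    have havne : avail ≠ [] := by
      intro h; rw [h] at hlen; simp at hlen
    obtain ⟨m, hm⟩ : ∃ m, PySem.List.max? (avail.map (fun s =>
        (PySem.List.pyGet? ((PySem.List.pyGet? ability s).getD []) (i : Int)).getD 0
          + pvBest ability rem (i + 1) (avail.filter (fun t => t != s)))) (fun x => x) = some m := by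
      cases hcase : PySem.List.max? (avail.map (fun s =>
          (PySem.List.pyGet? ((PySem.List.pyGet? ability s).getD []) (i : Int)).getD 0
            + pvBest ability rem (i + 1) (avail.filter (fun t => t != s)))) (fun x => x) with
      | none =>
        rw [PySem.List.max?_eq_none_iff] at hcase
        simp [havne] at hcase
      | some m => exact ⟨m, rfl⟩
    have hbest : pvBest ability (rem + 1) i avail = m := by
      simp only [pvBest, hm, Option.getD_some]
    have hfilter : ∀ (j : Nat) (hj : j < avail.length),
        avail.filter (fun t => t != avail[j]) = avail.eraseIdx j := by
      intro j hj
      rw [← List.Nodup.erase_eq_filter hnd, List.Nodup.erase_getElem hnd j hj]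
    have hsub : ∀ (j : Nat) (hj : j < avail.length),
        pvBest ability rem (i + 1) (avail.eraseIdx j)
            ∈ (PySem.List.permutations (avail.eraseIdx j) rem).map (fun l => pvPSum ability l (i + 1))
          ∧ ∀ x ∈ (PySem.List.permutations (avail.eraseIdx j) rem).map (fun l => pvPSum ability l (i + 1)),
              x ≤ pvBest ability rem (i + 1) (avail.eraseIdx j) := by
      intro j hj
      apply ih
      · exact List.Nodup.eraseIdx j hnd
      · rw [List.length_eraseIdx_of_lt hj]; omega
    rw [hbest]
    constructor
    · -- m is one of the permutation sums
      have hmem := PySem.List.max?_mem hm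
      simp only [List.mem_map] at hmem
      obtain ⟨s, hs, hfs⟩ := hmem
      obtain ⟨j, hj, rfl⟩ := List.mem_iff_getElem.mp hs
      rw [hfilter j hj] at hfs
      obtain ⟨q, hq, hqe⟩ := by
        have := (hsub j hj).1
        simpa only [List.mem_map] using this
      rw [PySem.List.permutations]
      simp only [List.mem_map, List.mem_flatMap, List.mem_range]
      refine ⟨avail[j] :: q, ⟨j, hj, ?_⟩, ?_⟩
      · rw [List.getElem?_eq_getElem hj]
        simp only [List.mem_map]
        exact ⟨q, hq, rfl⟩
      · rw [← hfs, ← hqe]; simp [pvPSum, pvVal]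
    · -- m bounds every permutation sum
      intro x hx
      rw [PySem.List.permutations] at hx
      simp only [List.mem_map, List.mem_flatMap, List.mem_range] at hx
      obtain ⟨l, ⟨j, hj, hl⟩, rfl⟩ := hx
      rw [List.getElem?_eq_getElem hj] at hl
      simp only [List.mem_map] at hl
      obtain ⟨q, hq, rfl⟩ := hl
      have h1 : pvPSum ability q (i + 1) ≤ pvBest ability rem (i + 1) (avail.eraseIdx j) := by
        exact (hsub j hj).2 _ (List.mem_map.mpr ⟨q, hq, rfl⟩)
      have h2 : pvVal ability avail[j] i + pvBest ability rem (i + 1) (avail.eraseIdx j) ≤ m := by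
        have hmax := PySem.List.max?_isMax hm
        apply hmax
        simp only [List.mem_map]
        refine ⟨avail[j], List.getElem_mem hj, ?_⟩
        rw [hfilter j hj]
        simp [pvVal]
      calc pvPSum ability (avail[j] :: q) i
          = pvVal ability avail[j] i + pvPSum ability q (i + 1) := by simp [pvPSum]
        _ ≤ pvVal ability avail[j] i + pvBest ability rem (i + 1) (avail.eraseIdx j) := by omega
        _ ≤ m := h2

theorem pv_foldl_append_map {α : Type} (g : α → Int) :
    ∀ (ll : List α) (acc : List Int), ll.foldl (fun a l => a ++ [g l]) acc = acc ++ ll.map g := by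
  intro ll
  induction ll with
  | nil => intro acc; simp
  | cons h t ih => intro acc; simp [List.foldl, ih, List.append_assoc]

theorem pv_inner_sum (ability : List (List Int)) : ∀ (l : List Int) (i0 : Nat) (c : Int),
    (List.range l.length).foldl
      (fun (s : Int) (j : Nat) => s + pvVal ability ((PySem.List.pyGet? l (j : Int)).getD 0) (i0 + j)) c
    = c + pvPSum ability l i0 := by
  intro l
  induction l with
  | nil => intro i0 c; simp [pvPSum]
  | cons s t ih =>
    intro i0 c
    simp only [List.length_cons, List.range_succ_eq_map, List.foldl_cons, List.foldl_map,
      PySem.List.pyGet?_natCast, List.getElem?_cons_zero, Option.getD_some, Nat.succ_eq_add_one,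
      List.getElem?_cons_succ]
    have hbody : (fun (a : Int) (j : Nat) => a + pvVal ability (t[j]?.getD 0) (i0 + (j + 1)))
        = fun (a : Int) (j : Nat) => a + pvVal ability (t[j]?.getD 0) ((i0 + 1) + j) := by
      funext a j
      congr 2
      omega
    rw [hbody]
    have ih' := ih (i0 + 1) (c + pvVal ability s (i0 + 0))
    simp only [PySem.List.pyGet?_natCast] at ih'
    rw [ih']
    simp [pvPSum]
    omega

theorem pv_pairwise_le_getLast? : ∀ (ys : List Int), ys.Pairwise (fun a b => a ≤ b) →
    ∀ x ∈ ys, ∀ m, ys.getLast? = some m → x ≤ m := by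
  intro ys
  induction ys with
  | nil => intro _ x hx; simp at hx
  | cons a t ih =>
    intro hpw x hx m hm
    rw [List.pairwise_cons] at hpw
    cases t with
    | nil => simp at hx hm; omega
    | cons b u =>
      rw [List.getLast?_cons_cons] at hm
      have hmmem : m ∈ b :: u := List.mem_of_getLast? hm
      rcases List.mem_cons.mp hx with rfl | hxt
      · exact hpw.1 m hmmem
      · exact ih hpw.2 x hxt m hm

theorem pv_last_is_max (xs : List Int) (m : Int)
    (hm : (PySem.List.pyGet? (PySem.List.sorted xs (fun x => x) false) (-1)).getD 0 = m)
    (hne : xs ≠ []) : m ∈ xs ∧ ∀ x ∈ xs, x ≤ m := by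
  have hysne : PySem.List.sorted xs (fun x => x) false ≠ [] := by
    rw [Ne, PySem.List.sorted_eq_nil_iff]; exact hne
  have hlast : PySem.List.pyGet? (PySem.List.sorted xs (fun x => x) false) (-1)
      = (PySem.List.sorted xs (fun x => x) false).getLast? := by
    rw [List.getLast?_eq_getElem?]
    simp only [PySem.List.pyGet?, PySem.List.pyIdx?]
    have hpos : 0 < (PySem.List.sorted xs (fun x => x) false).length :=
      List.length_pos_iff.mpr hysne
    rw [if_neg (by omega), if_pos (by omega)]
    rfl
  obtain ⟨a, ha⟩ := Option.isSome_iff_exists.mp (List.getLast?_isSome.mpr hysne)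
  rw [hlast, ha, Option.getD_some] at hm
  subst hm
  have hamem : a ∈ PySem.List.sorted xs (fun x => x) false := List.mem_of_getLast? ha
  refine ⟨(PySem.List.mem_sorted xs (fun x => x) false a).mp hamem, ?_⟩
  intro x hx
  have hxys : x ∈ PySem.List.sorted xs (fun x => x) false :=
    (PySem.List.mem_sorted xs (fun x => x) false x).mpr hx
  have hpw := PySem.List.sorted_pairwise xs (fun x => x)
  exact pv_pairwise_le_getLast? _ hpw x hxys a ha

-- ===== VERDICT (by name: the statement is the Claim_ definition above) =====
theorem solution_spec : Claim_equal_solution := by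
  intro ability _ hpre
  unfold Spec_solution
  obtain ⟨hne, hk, hrows⟩ := hpre
  cases ability with
  | nil => exact absurd rfl hne
  | cons h t =>
  clear hne hrows
  simp only [List.headD_cons, List.length_cons] at hk
  have hget0 : (PySem.List.pyGet? (h :: t) ((0 : Int))).getD [] = h := by
    rw [show ((0 : Int)) = ((0 : Nat) : Int) from rfl, PySem.List.pyGet?_natCast]; rfl
  have hstnd : ((List.range (h :: t).length).map (fun (i : Nat) => (i : Int))).Nodup :=
    (List.nodup_range).map (fun a b hab => by exact_mod_cast hab)
  have hstlen : h.length ≤ ((List.range (h :: t).length).map (fun (i : Nat) => (i : Int))).length := by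
    simp; omega
  have hB := pvBest_max (h :: t) h.length ((List.range (h :: t).length).map (fun (i : Nat) => (i : Int))) 0
    hstnd hstlen
  have hsumm : ((PySem.List.permutations ((List.range (h :: t).length).map (fun (i : Nat) => (i : Int)))
        h.length).foldl (fun summ l =>
      summ ++ [(List.range h.length).foldl (fun (s : Int) (i : Nat) =>
        s + (PySem.List.pyGet? ((PySem.List.pyGet? (h :: t)
              ((PySem.List.pyGet? l (i : Int)).getD 0)).getD []) (i : Int)).getD 0) 0]) [])
      = (PySem.List.permutations ((List.range (h :: t).length).map (fun (i : Nat) => (i : Int)))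
          h.length).map (fun l => pvPSum (h :: t) l 0) := by
    rw [pv_foldl_append_map, List.nil_append]
    apply List.map_congr_left
    intro l hl
    have hlen := pv_perm_length h.length _ l hl
    have hin := pv_inner_sum (h :: t) l 0 0
    simp only [Nat.zero_add] at hin
    rw [hlen] at hin
    simpa [pvVal] using hin
  have hLne : (PySem.List.permutations ((List.range (h :: t).length).map (fun (i : Nat) => (i : Int)))
      h.length).map (fun l => pvPSum (h :: t) l 0) ≠ [] := by
    intro hnil
    rw [hnil] at hB
    exact absurd hB.1 (by simp)
  have hA := pv_last_is_max ((PySem.List.permutations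
      ((List.range (h :: t).length).map (fun (i : Nat) => (i : Int))) h.length).map
      (fun l => pvPSum (h :: t) l 0)) _ rfl hLne
  simp only [solution, solution_alt, hget0]
  rw [hsumm]
  exact le_antisymm (hB.2 _ hA.1) (hA.2 _ hB.1)
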